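-- pv_equiv track=rewrite | github.com/whereisr0da/vuzzer64 | fuzzer-code/patternSystem.py | beautifyLine
-- ===== SOURCE A (Python) =====
-- def beautifyLine(str):
--     """ Remove all return line characters and remove duplicated spaces """
--
--     str = str.replace("\r\n", "").replace("\n", "")
--
--     tmpStr = ""
--     oldChar = -1
--
--     for c in str:
--         if oldChar == -1 or (oldChar != " " and c == " ") or (oldChar == " " and c != " ") or (oldChar != " " and c != " "):
--             tmpStr += c
--             oldChar = c
--
--     # if not the regex will not see the last element
--     if tmpStr[len(tmpStr)-1] != " ":
--         tmpStr += " "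
--
--     return tmpStr
-- ===== SOURCE B (Python) =====
-- import re
--
-- def beautifyLine(str):
--     """ Remove all return line characters and remove duplicated spaces """
--     s = str.replace("\r\n", "").replace("\n", "")
--     s = re.sub(" +", " ", s)
--     if not s.endswith(" "):
--         s += " "
--     return s
-- ===== Notes on version B (the rewrite author's own statement) =====
-- stated objective: faster
-- what changed: Replaces A's manual oldChar state machine (char-by-char Python loop with a four-way branch and repeated string concatenation) by a single regex substitution that collapses each run of spaces to one space, plus str.endswith for the trailing-space guard.
import Mathlib
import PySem

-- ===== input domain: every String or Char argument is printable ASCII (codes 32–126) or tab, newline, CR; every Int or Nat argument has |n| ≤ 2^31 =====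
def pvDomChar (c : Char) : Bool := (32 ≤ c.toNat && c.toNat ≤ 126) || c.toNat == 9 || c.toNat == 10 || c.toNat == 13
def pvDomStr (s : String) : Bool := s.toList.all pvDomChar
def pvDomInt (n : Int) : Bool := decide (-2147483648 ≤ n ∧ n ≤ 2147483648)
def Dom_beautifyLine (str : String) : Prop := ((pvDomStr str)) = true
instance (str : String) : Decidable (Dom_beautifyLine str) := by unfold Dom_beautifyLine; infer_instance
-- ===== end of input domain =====

-- B replaces A's manual oldChar state machine with a single regex-style collapse of space runs (idiomatic); return values agree wherever A returns.

-- ===== PORT A =====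
-- the for-loop of A, as structural recursion over the same state (tmpStr, oldChar);
-- oldChar : Option Char (none = the initial -1)
def pvALoop : List Char → List Char → Option Char → List Char
  | [], tmp, _ => tmp
  | c :: rest, tmp, old =>
    if old = none ∨ (old ≠ some ' ' ∧ c = ' ') ∨ (old = some ' ' ∧ c ≠ ' ') ∨ (old ≠ some ' ' ∧ c ≠ ' ')
    then pvALoop rest (tmp ++ [c]) (some c)
    else pvALoop rest tmp old

def beautifyLine (str : String) : String :=
  let s := PySem.Chars.replace (PySem.Chars.replace str.toList "\r\n".toList []) "\n".toList []
  let tmp := pvALoop s [] none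
  -- tmpStr[len(tmpStr)-1]: IndexError (none) exactly when tmp = [] — excluded by Pre_
  match PySem.List.pyGet? tmp ((tmp.length : Int) - 1) with
  | some c => if c ≠ ' ' then String.ofList (tmp ++ [' ']) else String.ofList tmp
  | none => String.ofList tmp    -- Python raises IndexError here; outside Pre_

-- ===== PORT B =====
-- re.sub(" +", " ", s): replace every maximal run of spaces by one space (hand port, exact:
-- on a space, emit one and skip the rest of the run; other characters pass through)
def pvCollapse : List Char → List Char
  | [] => []
  | c :: rest =>
    if c = ' ' then ' ' :: pvCollapse (rest.dropWhile (· == ' '))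
    else c :: pvCollapse rest
termination_by l => l.length
decreasing_by
  · exact Nat.lt_succ_of_le (List.length_dropWhile_le _ _)
  · simp

def beautifyLine_alt (str : String) : String :=
  let s := PySem.Chars.replace (PySem.Chars.replace str.toList "\r\n".toList []) "\n".toList []
  let t := pvCollapse s
  if PySem.Chars.endswith t [' '] then String.ofList t else String.ofList (t ++ [' '])

-- ===== PRECONDITION & SPEC =====
-- Pre_ excludes exactly the inputs that become empty after the two newline replaces:
-- there A's tmpStr[-1] raises IndexError (B would return " ").
def Pre_beautifyLine (str : String) : Prop :=
  PySem.Chars.replace (PySem.Chars.replace str.toList "\r\n".toList []) "\n".toList [] ≠ []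
instance (str : String) : Decidable (Pre_beautifyLine str) := by unfold Pre_beautifyLine; infer_instance
def pvWitness_beautifyLine : String := "a  b"

def Spec_beautifyLine (str : String) (out : String) : Prop := out = beautifyLine_alt str
instance (str : String) (out : String) : Decidable (Spec_beautifyLine str out) := by unfold Spec_beautifyLine; infer_instance

-- ===== CLAIM (what is proved, stated in full; the proofs are below) =====
def Claim_equal_beautifyLine : Prop := ∀ (str : String), Dom_beautifyLine str → Pre_beautifyLine str → Spec_beautifyLine str (beautifyLine str)

-- ===== LEMMAS AND PROOFS =====

-- A's loop computes B's run-collapse (the state matters only through oldChar = ' ')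
theorem pvALoop_eq (l : List Char) : ∀ (tmp : List Char) (old : Option Char),
    pvALoop l tmp old =
      tmp ++ (if old = some ' ' then pvCollapse (l.dropWhile (· == ' ')) else pvCollapse l) := by
  induction l with
  | nil => intro tmp old; simp [pvALoop, pvCollapse]
  | cons c rest ih =>
    intro tmp old
    by_cases hold : old = some ' ' <;> by_cases hc : c = ' ' <;>
      simp [pvALoop, pvCollapse, hold, hc, ih]

theorem pvCollapse_ne_nil (s : List Char) (h : s ≠ []) : pvCollapse s ≠ [] := by
  cases s with
  | nil => exact absurd rfl h
  | cons c rest => unfold pvCollapse; split <;> simp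

theorem pvLastElem (l : List Char) (h : l ≠ []) : l[l.length - 1]? = some (l.getLast h) := by
  rw [← List.getLast?_eq_getElem?, List.getLast?_eq_some_getLast h]

theorem endswith_space_iff (t : List Char) (h : t ≠ []) :
    PySem.Chars.endswith t [' '] = true ↔ t.getLast h = ' ' := by
  rw [PySem.Chars.endswith_iff]
  constructor
  · rintro ⟨u, hu⟩
    subst hu
    simp
  · intro hl
    exact ⟨t.dropLast, by simpa [hl] using List.dropLast_concat_getLast h⟩

-- ===== VERDICT (by name: the statement is the Claim_ definition above) =====
theorem beautifyLine_spec : Claim_equal_beautifyLine := by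
  intro str _ hpre
  unfold Spec_beautifyLine beautifyLine beautifyLine_alt
  set s := PySem.Chars.replace (PySem.Chars.replace str.toList "\r\n".toList []) "\n".toList [] with hs
  have hne : pvCollapse s ≠ [] := pvCollapse_ne_nil s hpre
  have htmp : pvALoop s [] none = pvCollapse s := by simp [pvALoop_eq]
  simp only [htmp]
  have hidx : ((pvCollapse s).length : Int) - 1 = ((pvCollapse s).length - 1 : Nat) := by
    have : 0 < (pvCollapse s).length := List.length_pos_iff.mpr hne
    omega
  rw [hidx, PySem.List.pyGet?_natCast, pvLastElem _ hne]
  by_cases hlast : (pvCollapse s).getLast hne = ' '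
  · simp [hlast, (endswith_space_iff _ hne).mpr hlast]
  · have hf : PySem.Chars.endswith (pvCollapse s) [' '] = false := by
      rw [Bool.eq_false_iff]; intro h; exact hlast ((endswith_space_iff _ hne).mp h)
    simp [hlast, hf]
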